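-- pv_equiv track=rewrite | github.com/deyanarajib/DM_Document-Clustering-by-Adding-Metadata-Using-the-COATES-Algorithm | Euclidean Distance.py | getIndeks
-- ===== SOURCE A (Python) =====
-- def getIndeks(X,Similar,TFIDF):
--     indeks=[]
--     for i in range(0,len(TFIDF)):
--         if X == 0:
--             indeks.append(Similar[i].index(min(Similar[i])))
--         else:
--             indeks.append(Similar[i].index(max(Similar[i])))
--     return indeks
-- ===== SOURCE B (Python) =====
-- def getIndeks(X, Similar, TFIDF):
--     want_min = (X == 0)
--     out = []
--     for row in Similar[:len(TFIDF)]: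
--         best_j, best_v, j = 0, row[0], 1
--         for v in row[1:]:
--             if (v < best_v) if want_min else (best_v < v):
--                 best_j, best_v = j, v
--             j += 1
--         out.append(best_j)
--     return out
-- ===== Notes on version B (the rewrite author's own statement) =====
-- stated objective: alternative
-- what changed: Hoists the X==0 decision out of the loop and replaces the two-pass min/max-then-.index per row by a single-pass argmin/argmax fold with an explicit (best_index, best_value) accumulator over each row, iterating rows directly over Similar[:len(TFIDF)] instead of indexing by range(len(TFIDF)).
import Mathlib
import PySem

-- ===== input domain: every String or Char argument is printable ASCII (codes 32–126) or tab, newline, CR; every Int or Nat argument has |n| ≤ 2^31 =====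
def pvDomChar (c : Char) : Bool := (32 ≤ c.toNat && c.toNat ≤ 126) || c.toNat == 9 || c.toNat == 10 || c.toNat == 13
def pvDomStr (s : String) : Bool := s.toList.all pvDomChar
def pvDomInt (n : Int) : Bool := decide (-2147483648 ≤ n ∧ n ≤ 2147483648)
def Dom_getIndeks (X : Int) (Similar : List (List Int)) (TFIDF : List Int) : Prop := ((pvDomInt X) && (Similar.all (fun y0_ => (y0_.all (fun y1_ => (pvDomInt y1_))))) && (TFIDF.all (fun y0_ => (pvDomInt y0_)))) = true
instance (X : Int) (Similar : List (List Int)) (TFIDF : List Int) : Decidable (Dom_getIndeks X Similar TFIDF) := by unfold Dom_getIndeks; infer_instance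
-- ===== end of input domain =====

-- B replaces A's two scans per row (min/max, then .index) by one single-pass argmin/argmax
-- fold with an explicit accumulator, hoisting the X==0 decision out of the loop (objective: alternative).

-- ===== PORT A =====
def getIndeks (X : Int) (Similar : List (List Int)) (TFIDF : List Int) : List Int :=
  (PySem.List.pyRange 0 (TFIDF.length : Int) 1).foldl (fun indeks i =>
    if X == 0 then
      indeks ++ [(((PySem.List.index? (PySem.List.pyGetD Similar i [])
        ((PySem.List.min? (PySem.List.pyGetD Similar i []) (fun y => y)).getD 0)).getD 0 : Nat) : Int)]
    else
      indeks ++ [(((PySem.List.index? (PySem.List.pyGetD Similar i [])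
        ((PySem.List.max? (PySem.List.pyGetD Similar i []) (fun y => y)).getD 0)).getD 0 : Nat) : Int)]) []

-- ===== PORT B =====
-- inner-loop body of Source B: one comparison, update (best_j, best_v, j)
def stepB (wantMin : Bool) (acc : Int × Int × Int) (v : Int) : Int × Int × Int :=
  if (if wantMin then v < acc.2.1 else acc.2.1 < v) then (acc.2.2, v, acc.2.2 + 1)
  else (acc.1, acc.2.1, acc.2.2 + 1)

-- one pass over row[1:] carrying (best_j, best_v, j)
def bestIdx (wantMin : Bool) (row : List Int) : Int :=
  ((PySem.List.slice row (some 1) none).foldl (stepB wantMin)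
    (0, PySem.List.pyGetD row 0 0, 1)).1

def getIndeks_alt (X : Int) (Similar : List (List Int)) (TFIDF : List Int) : List Int :=
  let wantMin := X == 0
  (PySem.List.slice Similar none (some (TFIDF.length : Int))).map (bestIdx wantMin)

-- ===== PRECONDITION & SPEC =====
-- Pre_ excludes exactly the inputs on which A raises: len(TFIDF) > len(Similar) (IndexError)
-- or an empty row among the first len(TFIDF) rows (ValueError from min/max of an empty list).
def Pre_getIndeks (X : Int) (Similar : List (List Int)) (TFIDF : List Int) : Prop :=
  TFIDF.length ≤ Similar.length ∧ ∀ row ∈ Similar.take TFIDF.length, row ≠ []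
instance (X : Int) (Similar : List (List Int)) (TFIDF : List Int) : Decidable (Pre_getIndeks X Similar TFIDF) := by unfold Pre_getIndeks; infer_instance

def pvWitness_getIndeks : Int × List (List Int) × List Int := (0, [[1, 2], [3, 0]], [5, 6])

def Spec_getIndeks (X : Int) (Similar : List (List Int)) (TFIDF : List Int) (out : List Int) : Prop := out = getIndeks_alt X Similar TFIDF
instance (X : Int) (Similar : List (List Int)) (TFIDF : List Int) (out : List Int) : Decidable (Spec_getIndeks X Similar TFIDF out) := by unfold Spec_getIndeks; infer_instance

-- ===== CLAIM (what is proved, stated in full; the proofs are below) =====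
def Claim_equal_getIndeks : Prop := ∀ (X : Int) (Similar : List (List Int)) (TFIDF : List Int), Dom_getIndeks X Similar TFIDF → Pre_getIndeks X Similar TFIDF → Spec_getIndeks X Similar TFIDF (getIndeks X Similar TFIDF)

-- ===== LEMMAS AND PROOFS =====

def famMin (x : Int) : List Int → Int
  | [] => 0
  | v :: t => if x ≤ t.foldl min v then 0 else 1 + famMin v t

def famMax (x : Int) : List Int → Int
  | [] => 0
  | v :: t => if t.foldl max v ≤ x then 0 else 1 + famMax v t

theorem foldl_min_shift (t : List Int) : ∀ a b : Int, t.foldl min (min a b) = min a (t.foldl min b) := by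
  induction t with
  | nil => intro a b; simp
  | cons c t ih => intro a b; simp only [List.foldl_cons]; rw [min_assoc, ih]

theorem foldl_max_shift (t : List Int) : ∀ a b : Int, t.foldl max (max a b) = max a (t.foldl max b) := by
  induction t with
  | nil => intro a b; simp
  | cons c t ih => intro a b; simp only [List.foldl_cons]; rw [max_assoc, ih]

theorem foldl_min_mem (t : List Int) : ∀ x : Int, t.foldl min x ∈ x :: t := by
  induction t with
  | nil => intro x; simp
  | cons v t ih =>
    intro x
    simp only [List.foldl_cons]
    rcases min_choice x v with h | h <;> rw [h]
    · rcases List.mem_cons.1 (ih x) with h' | h' <;> simp [h']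
    · rcases List.mem_cons.1 (ih v) with h' | h' <;> simp [h']

theorem foldl_max_mem (t : List Int) : ∀ x : Int, t.foldl max x ∈ x :: t := by
  induction t with
  | nil => intro x; simp
  | cons v t ih =>
    intro x
    simp only [List.foldl_cons]
    rcases max_choice x v with h | h <;> rw [h]
    · rcases List.mem_cons.1 (ih x) with h' | h' <;> simp [h']
    · rcases List.mem_cons.1 (ih v) with h' | h' <;> simp [h']

theorem idx_min_eq_fam (t : List Int) : ∀ x : Int,
    (((PySem.List.index? (x :: t) (t.foldl min x)).getD 0 : Nat) : Int) = famMin x t := by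
  induction t with
  | nil => intro x; simp [famMin]
  | cons v t ih =>
    intro x
    have hshift : (v :: t).foldl min x = min x (t.foldl min v) := by
      simp only [List.foldl_cons]
      have : min x v = min x (min v v) := by simp
      rw [this, foldl_min_shift]
      simp
    rw [hshift]
    by_cases h : x ≤ t.foldl min v
    · rw [min_eq_left h, PySem.List.index?_cons_self]
      simp [famMin, h]
    · have hlt : t.foldl min v < x := lt_of_not_ge h
      rw [min_eq_right (le_of_lt hlt)]
      rw [PySem.List.index?_cons_of_ne _ (by omega)]
      have hmem : t.foldl min v ∈ v :: t := foldl_min_mem t v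
      have hsome : (PySem.List.index? (v :: t) (t.foldl min v)).isSome = true :=
        (PySem.List.index?_isSome_iff _ _).2 hmem
      obtain ⟨k, hk⟩ := Option.isSome_iff_exists.1 hsome
      have ihv := ih v
      rw [hk] at ihv ⊢
      simp only [Option.map_some, Option.getD_some] at ihv ⊢
      simp only [famMin, h, if_false]
      push_cast
      omega

theorem idx_max_eq_fam (t : List Int) : ∀ x : Int,
    (((PySem.List.index? (x :: t) (t.foldl max x)).getD 0 : Nat) : Int) = famMax x t := by
  induction t with
  | nil => intro x; simp [famMax]
  | cons v t ih =>
    intro x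
    have hshift : (v :: t).foldl max x = max x (t.foldl max v) := by
      simp only [List.foldl_cons]
      have : max x v = max x (max v v) := by simp
      rw [this, foldl_max_shift]
      simp
    rw [hshift]
    by_cases h : t.foldl max v ≤ x
    · rw [max_eq_left h, PySem.List.index?_cons_self]
      simp [famMax, h]
    · have hlt : x < t.foldl max v := lt_of_not_ge h
      rw [max_eq_right (le_of_lt hlt)]
      rw [PySem.List.index?_cons_of_ne _ (by omega)]
      have hmem : t.foldl max v ∈ v :: t := foldl_max_mem t v
      have hsome : (PySem.List.index? (v :: t) (t.foldl max v)).isSome = true :=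
        (PySem.List.index?_isSome_iff _ _).2 hmem
      obtain ⟨k, hk⟩ := Option.isSome_iff_exists.1 hsome
      have ihv := ih v
      rw [hk] at ihv ⊢
      simp only [Option.map_some, Option.getD_some] at ihv ⊢
      simp only [famMax, h, if_false]
      push_cast
      omega


theorem stepB_true_eval (bj bv j v : Int) :
    stepB true (bj, bv, j) v = if v < bv then (j, v, j + 1) else (bj, bv, j + 1) := by
  simp [stepB]

theorem stepB_false_eval (bj bv j v : Int) :
    stepB false (bj, bv, j) v = if bv < v then (j, v, j + 1) else (bj, bv, j + 1) := by
  simp [stepB]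

theorem foldl_min_step (t' : List Int) : ∀ (v bj bv j : Int),
    (((v :: t').foldl (stepB true) (bj, bv, j)).1)
    = if bv ≤ t'.foldl min v then bj else j + famMin v t' := by
  induction t' with
  | nil =>
    intro v bj bv j
    rw [List.foldl_cons, stepB_true_eval]
    simp only [List.foldl_nil, famMin]
    split_ifs <;> simp_all <;> omega
  | cons w t'' ih =>
    intro v bj bv j
    have hM : (w :: t'').foldl min v = min v (t''.foldl min w) := by
      simp only [List.foldl_cons]
      have : min v w = min v (min w w) := by simp
      rw [this, foldl_min_shift]; simp
    rw [List.foldl_cons, stepB_true_eval, hM]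
    by_cases hv : v < bv
    · rw [if_pos hv, ih w j v (j + 1)]
      simp only [famMin]
      have h1 : ¬ bv ≤ min v (t''.foldl min w) := by
        have := min_le_left v (t''.foldl min w); omega
      rw [if_neg h1]
      by_cases h2 : v ≤ t''.foldl min w
      · rw [if_pos h2, if_pos h2]; omega
      · rw [if_neg h2, if_neg h2]; omega
    · rw [if_neg hv, ih w bj bv (j + 1)]
      simp only [famMin]
      have hbv : bv ≤ v := by omega
      by_cases h2 : bv ≤ t''.foldl min w
      · rw [if_pos h2, if_pos (le_min hbv h2)]
      · rw [if_neg h2]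
        have h3 : ¬ bv ≤ min v (t''.foldl min w) := by
          have := min_le_right v (t''.foldl min w); omega
        rw [if_neg h3, if_neg (by omega : ¬ v ≤ t''.foldl min w)]
        omega

theorem foldl_max_step (t' : List Int) : ∀ (v bj bv j : Int),
    (((v :: t').foldl (stepB false) (bj, bv, j)).1)
    = if t'.foldl max v ≤ bv then bj else j + famMax v t' := by
  induction t' with
  | nil =>
    intro v bj bv j
    rw [List.foldl_cons, stepB_false_eval]
    simp only [List.foldl_nil, famMax]
    split_ifs <;> simp_all <;> omega
  | cons w t'' ih =>
    intro v bj bv j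
    have hM : (w :: t'').foldl max v = max v (t''.foldl max w) := by
      simp only [List.foldl_cons]
      have : max v w = max v (max w w) := by simp
      rw [this, foldl_max_shift]; simp
    rw [List.foldl_cons, stepB_false_eval, hM]
    by_cases hv : bv < v
    · rw [if_pos hv, ih w j v (j + 1)]
      simp only [famMax]
      have h1 : ¬ max v (t''.foldl max w) ≤ bv := by
        have := le_max_left v (t''.foldl max w); omega
      rw [if_neg h1]
      by_cases h2 : t''.foldl max w ≤ v
      · rw [if_pos h2, if_pos h2]; omega
      · rw [if_neg h2, if_neg h2]; omega
    · rw [if_neg hv, ih w bj bv (j + 1)]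
      simp only [famMax]
      have hbv : v ≤ bv := by omega
      by_cases h2 : t''.foldl max w ≤ bv
      · rw [if_pos h2, if_pos (max_le hbv h2)]
      · rw [if_neg h2]
        have h3 : ¬ max v (t''.foldl max w) ≤ bv := by
          have := le_max_right v (t''.foldl max w); omega
        rw [if_neg h3, if_neg (by omega : ¬ t''.foldl max w ≤ v)]
        omega

theorem pyGetD_zero_cons (x : Int) (t : List Int) : PySem.List.pyGetD (x :: t) 0 0 = x := by
  simp [PySem.List.pyGetD, PySem.List.pyGet?, PySem.List.pyIdx?]

theorem bestIdx_min (x : Int) (t : List Int) : bestIdx true (x :: t) = famMin x t := by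
  unfold bestIdx
  rw [PySem.List.slice_from_one]
  simp only [List.tail_cons]
  rw [pyGetD_zero_cons]
  cases t with
  | nil => simp [famMin]
  | cons v t' =>
    rw [foldl_min_step t' v 0 x 1]
    simp only [famMin]

theorem bestIdx_max (x : Int) (t : List Int) : bestIdx false (x :: t) = famMax x t := by
  unfold bestIdx
  rw [PySem.List.slice_from_one]
  simp only [List.tail_cons]
  rw [pyGetD_zero_cons]
  cases t with
  | nil => simp [famMax]
  | cons v t' =>
    rw [foldl_max_step t' v 0 x 1]
    simp only [famMax]

theorem rowA_min (row : List Int) (h : row ≠ []) :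
    (((PySem.List.index? row ((PySem.List.min? row (fun y => y)).getD 0)).getD 0 : Nat) : Int)
      = bestIdx true row := by
  cases row with
  | nil => exact absurd rfl h
  | cons x t =>
    rw [PySem.List.min?_id_cons, Option.getD_some, bestIdx_min]
    exact idx_min_eq_fam t x

theorem rowA_max (row : List Int) (h : row ≠ []) :
    (((PySem.List.index? row ((PySem.List.max? row (fun y => y)).getD 0)).getD 0 : Nat) : Int)
      = bestIdx false row := by
  cases row with
  | nil => exact absurd rfl h
  | cons x t =>
    rw [PySem.List.max?_id_cons, Option.getD_some, bestIdx_max]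
    exact idx_max_eq_fam t x

theorem foldl_pyRange_take {α β : Type} (xs : List α) (d : α) (f : β → α → β) :
    ∀ (n : Nat) (init : β), n ≤ xs.length →
    (PySem.List.pyRange 0 (n : Int) 1).foldl (fun acc j => f acc (PySem.List.pyGetD xs j d)) init
      = (xs.take n).foldl f init := by
  intro n
  induction n with
  | zero => intro init _; simp [PySem.List.pyRange_one_eq_nil]
  | succ m ih =>
    intro init hm
    have h1 : ((m + 1 : Nat) : Int) = (m : Int) + 1 := by push_cast; ring
    rw [h1, PySem.List.pyRange_one_succ_right (by positivity), List.foldl_append]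
    rw [ih init (by omega)]
    have hlt : m < xs.length := by omega
    rw [List.take_add_one, List.getElem?_eq_getElem hlt]
    simp only [Option.toList_some, List.foldl_append, List.foldl_cons, List.foldl_nil]
    rw [PySem.List.pyGetD_eq_getElem xs d (by positivity) (by exact_mod_cast hlt)]
    simp

theorem foldl_append_map {α β : Type} (g : α → β) :
    ∀ (l : List α) (acc : List β), l.foldl (fun a r => a ++ [g r]) acc = acc ++ l.map g := by
  intro l
  induction l with
  | nil => intro acc; simp
  | cons x t ih => intro acc; simp [ih]

-- ===== VERDICT (by name: the statement is the Claim_ definition above) =====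
theorem getIndeks_spec : Claim_equal_getIndeks := by
  intro X Similar TFIDF _ hPre
  obtain ⟨hlen, hrows⟩ := hPre
  unfold Spec_getIndeks getIndeks getIndeks_alt
  rw [PySem.List.slice_to_natCast]
  by_cases hX : X = 0
  · subst hX
    simp only [beq_self_eq_true, if_true]
    refine (foldl_pyRange_take Similar ([] : List Int)
      (fun acc row => acc ++ [(((PySem.List.index? row
        ((PySem.List.min? row (fun y => y)).getD 0)).getD 0 : Nat) : Int)])
      TFIDF.length [] hlen).trans ?_
    refine (foldl_append_map _ (Similar.take TFIDF.length) []).trans ?_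
    rw [List.nil_append]
    exact List.map_congr_left (fun row hrow => rowA_min row (hrows row hrow))
  · have hb : (X == 0) = false := by simp [hX]
    simp only [hb, Bool.false_eq_true, if_false]
    refine (foldl_pyRange_take Similar ([] : List Int)
      (fun acc row => acc ++ [(((PySem.List.index? row
        ((PySem.List.max? row (fun y => y)).getD 0)).getD 0 : Nat) : Int)])
      TFIDF.length [] hlen).trans ?_
    refine (foldl_append_map _ (Similar.take TFIDF.length) []).trans ?_
    rw [List.nil_append]
    exact List.map_congr_left (fun row hrow => rowA_max row (hrows row hrow))
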